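-- pv_equiv track=rewrite | github.com/sih-hmpi/Disease_Engine | engine.py | determine_overall_risk
-- ===== SOURCE A (Python) =====
-- from typing import Dict, Any, Optional, List
--
-- def determine_overall_risk(risk_levels: List[str]) -> str:
--     """Determine overall risk based on individual element risks."""
--     risk_priority = {
--         'Safe': 0,
--         'Elevated Risk': 1,
--         'High Risk': 2,
--         'Severe Risk': 3,
--         'Unknown Element': 0,
--         'No Classification Available': 0
--     }
--
--     if not risk_levels:
--         return 'No Data'
--
--     max_risk_score = max(risk_priority.get(level, 0) for level in risk_levels)
--
--     for level, score in risk_priority.items():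
--         if score == max_risk_score:
--             return level
--
--     return 'Unknown'
-- ===== SOURCE B (Python) =====
-- def determine_overall_risk(risk_levels):
--     """Determine overall risk: priority-ordered membership checks, no scoring/max."""
--     if not risk_levels:
--         return 'No Data'
--     if 'Severe Risk' in risk_levels:
--         return 'Severe Risk'
--     if 'High Risk' in risk_levels:
--         return 'High Risk'
--     if 'Elevated Risk' in risk_levels:
--         return 'Elevated Risk'
--     return 'Safe'
-- ===== Notes on version B (the rewrite author's own statement) =====
-- stated objective: simpler
-- what changed: Replaces the score dictionary, the max scan over mapped scores and the reverse item-loop lookup with a direct descending-priority membership check over the three non-trivial labels.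
import Mathlib
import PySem

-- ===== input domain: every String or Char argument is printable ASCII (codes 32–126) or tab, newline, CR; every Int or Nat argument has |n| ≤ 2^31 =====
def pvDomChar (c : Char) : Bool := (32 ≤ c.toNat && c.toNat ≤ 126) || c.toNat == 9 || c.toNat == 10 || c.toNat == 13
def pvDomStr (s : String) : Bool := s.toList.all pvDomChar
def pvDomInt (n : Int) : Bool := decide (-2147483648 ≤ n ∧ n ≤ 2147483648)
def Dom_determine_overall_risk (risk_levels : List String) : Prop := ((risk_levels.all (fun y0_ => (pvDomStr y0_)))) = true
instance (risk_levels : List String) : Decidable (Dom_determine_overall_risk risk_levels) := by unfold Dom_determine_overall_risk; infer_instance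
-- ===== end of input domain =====

-- B replaces the score dict + max scan + reverse item-loop with a descending-priority membership chain (objective: simpler).
-- ===== PORT A =====
def riskPriorityA : PySem.Dict String Int :=
  PySem.Dict.ofList [("Safe", 0), ("Elevated Risk", 1), ("High Risk", 2), ("Severe Risk", 3),
                     ("Unknown Element", 0), ("No Classification Available", 0)]

-- the 'for level, score in risk_priority.items(): if score == max: return level' loop
def findLevelA : List (String × Int) → Int → String
  | [], _ => "Unknown"
  | (l, s) :: t, m => if s = m then l else findLevelA t m

def determine_overall_risk (risk_levels : List String) : String :=
  match risk_levels with
  | [] => "No Data"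
  | x :: t =>
    match PySem.List.max? ((x :: t).map fun level => riskPriorityA.getD level 0) (fun y => y) with
    | some m => findLevelA riskPriorityA.items m
    | none => "Unknown"   -- unreachable: the list x :: t is nonempty

-- ===== PORT B =====
def determine_overall_risk_alt (risk_levels : List String) : String :=
  if risk_levels.isEmpty then "No Data"
  else if risk_levels.contains "Severe Risk" then "Severe Risk"
  else if risk_levels.contains "High Risk" then "High Risk"
  else if risk_levels.contains "Elevated Risk" then "Elevated Risk"
  else "Safe"

-- ===== PRECONDITION & SPEC =====
def Spec_determine_overall_risk (risk_levels : List String) (out : String) : Prop := out = determine_overall_risk_alt risk_levels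
instance (risk_levels : List String) (out : String) : Decidable (Spec_determine_overall_risk risk_levels out) := by unfold Spec_determine_overall_risk; infer_instance

-- ===== CLAIM (what is proved, stated in full; the proofs are below) =====
def Claim_equal_determine_overall_risk : Prop := ∀ (risk_levels : List String), Dom_determine_overall_risk risk_levels → Spec_determine_overall_risk risk_levels (determine_overall_risk risk_levels)

-- ===== LEMMAS AND PROOFS =====

-- the score of a single label, in closed form
def scoreOf (l : String) : Int :=
  if l = "Severe Risk" then 3 else if l = "High Risk" then 2 else if l = "Elevated Risk" then 1 else 0

lemma getD_riskPriorityA (l : String) : riskPriorityA.getD l 0 = scoreOf l := by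
  simp only [riskPriorityA, scoreOf, PySem.Dict.getD_eq_get?_getD]
  rw [show (PySem.Dict.ofList [("Safe", (0 : Int)), ("Elevated Risk", 1), ("High Risk", 2),
        ("Severe Risk", 3), ("Unknown Element", 0), ("No Classification Available", 0)])
      = PySem.Dict.mk [("Safe", 0), ("Elevated Risk", 1), ("High Risk", 2), ("Severe Risk", 3),
        ("Unknown Element", 0), ("No Classification Available", 0)] from rfl]
  repeat rw [PySem.Dict.get?_mk_cons]
  split_ifs <;> simp_all
  rfl

-- the priority level of a list (0 for empty / unrecognised labels)
def mval (rs : List String) : Int :=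
  if rs.contains "Severe Risk" then 3
  else if rs.contains "High Risk" then 2
  else if rs.contains "Elevated Risk" then 1 else 0

lemma scoreOf_max_mval (y : String) (t : List String) :
    max (scoreOf y) (mval t) = mval (y :: t) := by
  simp only [scoreOf, mval, List.contains_cons]
  split_ifs with h1 h2 h3 <;> simp_all

lemma foldl_max_scores (t : List String) (a : Int) (ha : 0 ≤ a) :
    (t.map fun l => riskPriorityA.getD l 0).foldl max a = max a (mval t) := by
  induction t generalizing a with
  | nil => simp [mval]; omega
  | cons y t ih =>
    simp only [List.map_cons, List.foldl_cons]
    rw [ih (max a (riskPriorityA.getD y 0))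
        (le_trans ha (le_max_left _ _))]
    rw [getD_riskPriorityA, max_assoc, scoreOf_max_mval]

lemma scoreOf_nonneg (l : String) : 0 ≤ scoreOf l := by
  simp only [scoreOf]; split_ifs <;> omega

-- ===== VERDICT (by name: the statement is the Claim_ definition above) =====
theorem determine_overall_risk_spec : Claim_equal_determine_overall_risk := by
  unfold Claim_equal_determine_overall_risk
  intro rs _
  unfold Spec_determine_overall_risk
  cases rs with
  | nil => rfl
  | cons x t =>
    simp only [determine_overall_risk, determine_overall_risk_alt]
    rw [List.map_cons, PySem.List.max?_id_cons]
    have h : (t.map fun l => riskPriorityA.getD l 0).foldl max (riskPriorityA.getD x 0)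
        = mval (x :: t) := by
      rw [getD_riskPriorityA, foldl_max_scores t _ (scoreOf_nonneg x), scoreOf_max_mval]
    rw [show ((t.map fun l => riskPriorityA.getD l 0).foldl max (riskPriorityA.getD x 0)) = mval (x :: t) from h]
    simp only [List.isEmpty_cons, Bool.false_eq_true, if_false]
    unfold mval
    split_ifs with h1 h2 h3 <;> rfl
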